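-- pv_equiv track=rewrite | github.com/asmit404/GFG_Solutions | Gold Mine Problem.py | maxGold
-- ===== SOURCE A (Python) =====
-- def maxGold(n, m, M):
--     dp = [[0 for _ in range(m)] for _ in range(n)]
--
--     for i in range(n):
--         dp[i][m - 1] = M[i][m - 1]
--
--     for j in range(m - 2, -1, -1):
--         for i in range(n):
--             up_right = dp[i - 1][j + 1] if i > 0 else 0
--             right = dp[i][j + 1]
--             down_right = dp[i + 1][j + 1] if i < n - 1 else 0
--             dp[i][j] = M[i][j] + max(up_right, right, down_right)
--
--     return max(dp[i][0] for i in range(n))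
-- ===== SOURCE B (Python) =====
-- def maxGold(n, m, M):
--     cache = {}
--
--     def gold(i, j):
--         if (i, j) in cache:
--             return cache[(i, j)]
--         if j == m - 1:
--             v = M[i][j]
--         else:
--             v = M[i][j] + max(gold(i - 1, j + 1) if i > 0 else 0,
--                               gold(i, j + 1),
--                               gold(i + 1, j + 1) if i < n - 1 else 0)
--         cache[(i, j)] = v
--         return v
--
--     return max(gold(i, 0) for i in range(n))
-- ===== Notes on version B (the rewrite author's own statement) =====
-- stated objective: alternative
-- what changed: A fills an explicit n*m table bottom-up by a right-to-left column sweep and then scans column 0; B is a top-down memoized recursion gold(i,j) that computes only the cells reachable from column 0 on demand, caching on (i,j) in a dict, with the answer max(gold(i,0)).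
import Mathlib
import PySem

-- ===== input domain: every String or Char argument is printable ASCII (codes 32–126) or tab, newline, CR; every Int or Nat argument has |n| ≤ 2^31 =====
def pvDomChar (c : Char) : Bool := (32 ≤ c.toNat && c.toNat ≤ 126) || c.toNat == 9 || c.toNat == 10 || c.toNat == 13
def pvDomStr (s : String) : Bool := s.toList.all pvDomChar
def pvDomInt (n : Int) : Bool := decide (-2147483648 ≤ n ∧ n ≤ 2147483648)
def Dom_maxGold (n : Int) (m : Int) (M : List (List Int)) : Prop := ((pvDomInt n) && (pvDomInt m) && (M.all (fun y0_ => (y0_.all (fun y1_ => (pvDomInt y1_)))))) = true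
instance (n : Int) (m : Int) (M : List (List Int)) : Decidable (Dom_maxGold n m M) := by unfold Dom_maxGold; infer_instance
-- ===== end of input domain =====

-- B replaces A's bottom-up right-to-left column sweep over an explicit n*m table with a top-down
-- memoized recursion gold(i,j) caching on (i,j); equivalence is about the return value only.

-- ===== PORT A =====
-- helper: Python list assignment xs[j] = v (negative index wraps; out-of-range raise excluded by Pre_)
def pySetRow (row : List Int) (j : Int) (v : Int) : List Int :=
  row.set (if j < 0 then j + row.length else j).toNat v

-- helper: Python dp[i][j] = v
def pySet2 (dp : List (List Int)) (i j : Int) (v : Int) : List (List Int) :=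
  dp.modify (if i < 0 then i + dp.length else i).toNat (fun row => pySetRow row j v)

-- helper: the body of A's outer `for j in range(m-2,-1,-1)` loop (the inner `for i in range(n)`)
def pvAstep (n m : Int) (M : List (List Int)) (dp : List (List Int)) (j : Int) : List (List Int) :=
  (List.range n.toNat).foldl (fun dp (i : Nat) =>
    let upRight := if (0:Int) < (i:Int) then PySem.List.pyGetD (PySem.List.pyGetD dp ((i:Int)-1) []) (j+1) 0 else 0
    let right := PySem.List.pyGetD (PySem.List.pyGetD dp (i:Int) []) (j+1) 0
    let downRight := if (i:Int) < n-1 then PySem.List.pyGetD (PySem.List.pyGetD dp ((i:Int)+1) []) (j+1) 0 else 0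
    pySet2 dp (i:Int) j (PySem.List.pyGetD (PySem.List.pyGetD M (i:Int) []) j 0 + max upRight (max right downRight))) dp

def maxGold (n : Int) (m : Int) (M : List (List Int)) : Int :=
  let dp0 : List (List Int) := (List.range n.toNat).map (fun _ => List.replicate m.toNat (0:Int))
  let dp1 := (List.range n.toNat).foldl (fun dp (i : Nat) =>
      pySet2 dp (i:Int) (m-1) (PySem.List.pyGetD (PySem.List.pyGetD M (i:Int) []) (m-1) 0)) dp0
  let dp2 := (PySem.List.pyRange (m-2) (-1) (-1)).foldl (pvAstep n m M) dp1
  (PySem.List.max? ((List.range n.toNat).map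
      (fun (i : Nat) => PySem.List.pyGetD (PySem.List.pyGetD dp2 (i:Int) []) 0 0)) id).getD 0

-- ===== PORT B =====
-- helper: B's memoized recursive gold(i, j), cache threaded explicitly; the fuel argument only
-- makes the recursion structurally terminating (it is (m-1-j).toNat at every reachable call and
-- the 0-branch is never taken on admitted inputs)
def pvGold (n m : Int) (M : List (List Int)) :
    Nat → Int → Int → PySem.Dict (Int × Int) Int → Int × PySem.Dict (Int × Int) Int
  | fuel, i, j, cache =>
    match cache.get? (i, j) with
    | some v => (v, cache)
    | none =>
      if j = m - 1 then
        let v := PySem.List.pyGetD (PySem.List.pyGetD M i []) j 0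
        (v, cache.insert (i, j) v)
      else
        match fuel with
        | 0 => (0, cache)
        | Nat.succ fuel =>
          let ur := if 0 < i then pvGold n m M fuel (i-1) (j+1) cache else (0, cache)
          let r := pvGold n m M fuel i (j+1) ur.2
          let dr := if i < n - 1 then pvGold n m M fuel (i+1) (j+1) r.2 else (0, r.2)
          let v := PySem.List.pyGetD (PySem.List.pyGetD M i []) j 0 + max ur.1 (max r.1 dr.1)
          (v, dr.2.insert (i, j) v)

def maxGold_alt (n : Int) (m : Int) (M : List (List Int)) : Int :=
  let res := (List.range n.toNat).foldl (fun acc (i : Nat) =>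
      let r := pvGold n m M (m-1).toNat (i:Int) 0 acc.2
      (acc.1 ++ [r.1], r.2)) (([] : List Int), (PySem.Dict.empty : PySem.Dict (Int × Int) Int))
  (PySem.List.max? res.1 id).getD 0

-- ===== PRECONDITION & SPEC =====
-- Pre_ is exactly where Python A returns: n ≥ 1 (else max() over an empty generator raises ValueError),
-- m ≥ 1 (else dp[i][-1] hits an empty dp row, IndexError), M has at least n rows and each of the first n
-- rows has at least m entries (else an IndexError).
def Pre_maxGold (n : Int) (m : Int) (M : List (List Int)) : Prop :=
  1 ≤ n ∧ 1 ≤ m ∧ n ≤ (M.length : Int) ∧ ∀ row ∈ M.take n.toNat, m ≤ (row.length : Int)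
instance (n : Int) (m : Int) (M : List (List Int)) : Decidable (Pre_maxGold n m M) := by
  unfold Pre_maxGold; infer_instance

def pvWitness_maxGold : Int × Int × List (List Int) := (2, 2, [[1, 2], [3, 4]])

def Spec_maxGold (n : Int) (m : Int) (M : List (List Int)) (out : Int) : Prop := out = maxGold_alt n m M
instance (n : Int) (m : Int) (M : List (List Int)) (out : Int) : Decidable (Spec_maxGold n m M out) := by
  unfold Spec_maxGold; infer_instance

-- ===== CLAIM (what is proved, stated in full; the proofs are below) =====
def Claim_equal_maxGold : Prop := ∀ (n : Int) (m : Int) (M : List (List Int)),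
  Dom_maxGold n m M → Pre_maxGold n m M → Spec_maxGold n m M (maxGold n m M)

-- ===== LEMMAS AND PROOFS =====

-- the common mathematical recurrence: pvG M N mN t i = best gold from cell (i, mN-1-t)
def pvG (n : Int) (M : List (List Int)) (mN : Nat) : Nat → Nat → Int
  | 0, i => (M.getD i []).getD (mN - 1) 0
  | t+1, i =>
      (M.getD i []).getD (mN - 1 - (t+1)) 0 +
        max (if i = 0 then 0 else pvG n M mN t (i-1))
          (max (pvG n M mN t i) (if (i:Int) < n - 1 then pvG n M mN t (i+1) else 0))

-- the cell dp[i][j] (0 when out of range) and the shape of the dp table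
def pvCell (dp : List (List Int)) (i j : Nat) : Int := (dp.getD i []).getD j 0
def pvShape (N mN : Nat) (dp : List (List Int)) : Prop :=
  dp.length = N ∧ ∀ i, i < N → (dp.getD i []).length = mN

lemma pvCell_pySet2 {N mN : Nat} {dp : List (List Int)} (h : pvShape N mN dp)
    {i c : Nat} (hi : i < N) (hc : c < mN) (v : Int) :
    pvShape N mN (pySet2 dp (i:Int) (c:Int) v) ∧
    ∀ i' j', i' < N → j' < mN →
      pvCell (pySet2 dp (i:Int) (c:Int) v) i' j' = if i' = i ∧ j' = c then v else pvCell dp i' j' := by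
  obtain ⟨hlen, hrow⟩ := h
  have hset : pySet2 dp (i:Int) (c:Int) v = dp.modify i (fun row => row.set c v) := by
    unfold pySet2 pySetRow
    have h1 : ¬ ((i:Int) < 0) := not_lt.mpr (Int.natCast_nonneg i)
    have h2 : ¬ ((c:Int) < 0) := not_lt.mpr (Int.natCast_nonneg c)
    simp [h1, h2]
  rw [hset]
  have hget : ∀ i', i' < N → (dp.modify i (fun row => row.set c v)).getD i' [] =
      if i' = i then (dp.getD i' []).set c v else dp.getD i' [] := by
    intro i' hi'
    rw [List.getD_eq_getElem?_getD, List.getElem?_modify, List.getElem?_eq_getElem (by omega)]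
    rw [List.getD_eq_getElem?_getD (l := dp), List.getElem?_eq_getElem (by omega)]
    by_cases he : i' = i
    · subst he; simp
    · simp [Ne.symm he, he]
  refine ⟨⟨by simp [hlen], ?_⟩, ?_⟩
  · intro i' hi'
    rw [hget i' hi']
    by_cases he : i' = i
    · rw [if_pos he, List.length_set, he]; exact hrow i hi
    · rw [if_neg he]; exact hrow i' hi'
  · intro i' j' hi' hj'
    unfold pvCell
    rw [hget i' hi']
    by_cases he : i' = i
    · subst he
      rw [if_pos rfl, List.getD_eq_getElem?_getD, List.getElem?_set]
      by_cases hj : c = j'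
      · subst hj
        rw [if_pos rfl, if_pos (by rw [hrow i' hi']; exact hc)]
        simp
      · simp [hj, Ne.symm hj, List.getD_eq_getElem?_getD]
    · simp [he]

lemma pvColwrite {N mN : Nat} (c : Nat) (hc : c < mN) (val : List (List Int) → Nat → Int)
    (hval : ∀ dpa dpb, pvShape N mN dpa → pvShape N mN dpb →
      (∀ i' j', i' < N → j' < mN → j' ≠ c → pvCell dpa i' j' = pvCell dpb i' j') →
      ∀ i, i < N → val dpa i = val dpb i) :
    ∀ (is : List Nat), is.Nodup → (∀ i ∈ is, i < N) → ∀ dp, pvShape N mN dp →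
      pvShape N mN (is.foldl (fun dp (i : Nat) => pySet2 dp (i:Int) (c:Int) (val dp i)) dp) ∧
      (∀ i' j', i' < N → j' < mN → j' ≠ c →
        pvCell (is.foldl (fun dp (i : Nat) => pySet2 dp (i:Int) (c:Int) (val dp i)) dp) i' j' = pvCell dp i' j') ∧
      (∀ i ∈ is, pvCell (is.foldl (fun dp (i : Nat) => pySet2 dp (i:Int) (c:Int) (val dp i)) dp) i c = val dp i) ∧
      (∀ i, i < N → i ∉ is → pvCell (is.foldl (fun dp (i : Nat) => pySet2 dp (i:Int) (c:Int) (val dp i)) dp) i c = pvCell dp i c) := by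
  intro is
  induction is with
  | nil => intro _ _ dp hdp; exact ⟨hdp, fun _ _ _ _ _ => rfl, fun i hi => absurd hi (List.not_mem_nil), fun _ _ _ => rfl⟩
  | cons i0 rest ih =>
    intro hnd hmem dp hdp
    have hi0 : i0 < N := hmem i0 List.mem_cons_self
    obtain ⟨hstep, hcell⟩ := pvCell_pySet2 hdp hi0 hc (val dp i0)
    obtain ⟨ih1, ih2, ih3, ih4⟩ := ih (List.nodup_cons.mp hnd).2
      (fun i hi => hmem i (List.mem_cons_of_mem _ hi)) _ hstep
    have hagree : ∀ i' j', i' < N → j' < mN → j' ≠ c →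
        pvCell (pySet2 dp (i0:Int) (c:Int) (val dp i0)) i' j' = pvCell dp i' j' := by
      intro i' j' h1 h2 h3
      rw [hcell i' j' h1 h2, if_neg (by tauto)]
    have hi0notin : i0 ∉ rest := (List.nodup_cons.mp hnd).1
    refine ⟨ih1, ?_, ?_, ?_⟩
    · intro i' j' h1 h2 h3
      rw [List.foldl_cons, ih2 i' j' h1 h2 h3, hagree i' j' h1 h2 h3]
    · intro i hi
      rcases List.mem_cons.mp hi with h | h
      · subst h
        rw [List.foldl_cons, ih4 i hi0 hi0notin, hcell i c hi0 hc, if_pos ⟨rfl, rfl⟩]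
      · rw [List.foldl_cons, ih3 i h]
        exact hval _ _ hstep hdp hagree i (hmem i hi)
    · intro i hi hnin
      rw [List.foldl_cons, ih4 i hi (fun hh => hnin (List.mem_cons_of_mem _ hh)),
        hcell i c hi hc, if_neg (by intro hh; exact hnin (hh.1 ▸ List.mem_cons_self))]

-- one downward step of pyRange with step -1
lemma pvPyRangeDown_cons (a : Int) (h : 0 ≤ a) :
    PySem.List.pyRange a (-1) (-1) = a :: PySem.List.pyRange (a - 1) (-1) (-1) := by
  obtain ⟨t, rfl⟩ := Int.eq_ofNat_of_zero_le h
  simp only [PySem.List.pyRange]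
  norm_num
  have h2 : (if 0 < t then t else 0) = t := by split <;> omega
  rw [if_pos (by omega), h2, List.range_succ_eq_map, List.map_cons, List.map_map]
  refine List.cons_eq_cons.mpr ⟨by simp, ?_⟩
  apply List.map_congr_left
  intro k hk
  simp only [Function.comp_apply, Nat.succ_eq_add_one]
  push_cast
  ring

-- one outer-loop step of A writes column c from column c+1
lemma pvAstep_spec {n m : Int} {M : List (List Int)} {N mN : Nat}
    (hn : n = (N:Int)) (c : Nat) (hc : c + 1 < mN)
    (dp : List (List Int)) (hdp : pvShape N mN dp) :
    pvShape N mN (pvAstep n m M dp (c:Int)) ∧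
    ∀ i, i < N → pvCell (pvAstep n m M dp (c:Int)) i c =
      PySem.List.pyGetD (M.getD i []) (c:Int) 0 +
        max (if i = 0 then 0 else pvCell dp (i-1) (c+1))
          (max (pvCell dp i (c+1)) (if i + 1 < N then pvCell dp (i+1) (c+1) else 0)) := by
  have hN : N = n.toNat := by omega
  have hval_cell : ∀ (dpx : List (List Int)) (i : Nat), i < N → pvShape N mN dpx →
      (if (0:Int) < ((i:Nat):Int) then
          PySem.List.pyGetD (PySem.List.pyGetD dpx (((i:Nat):Int)-1) []) (((c:Nat):Int)+1) 0 else 0) =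
        (if i = 0 then 0 else pvCell dpx (i-1) (c+1)) ∧
      PySem.List.pyGetD (PySem.List.pyGetD dpx ((i:Nat):Int) []) (((c:Nat):Int)+1) 0 = pvCell dpx i (c+1) ∧
      (if ((i:Nat):Int) < n-1 then
          PySem.List.pyGetD (PySem.List.pyGetD dpx (((i:Nat):Int)+1) []) (((c:Nat):Int)+1) 0 else 0) =
        (if i + 1 < N then pvCell dpx (i+1) (c+1) else 0) := by
    intro dpx i hi hshape
    have hc1 : (((c:Nat):Int)+1) = (((c+1:Nat)):Int) := by push_cast; ring
    refine ⟨?_, ?_, ?_⟩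
    · by_cases h0 : i = 0
      · subst h0; simp
      · rw [if_pos (by omega), if_neg h0]
        have : (((i:Nat):Int)-1) = (((i-1:Nat)):Int) := by omega
        rw [this, hc1, PySem.List.pyGetD_natCast, PySem.List.pyGetD_natCast]
        rfl
    · rw [hc1, PySem.List.pyGetD_natCast, PySem.List.pyGetD_natCast]; rfl
    · by_cases hlast : i + 1 < N
      · rw [if_pos (by omega), if_pos hlast]
        have : (((i:Nat):Int)+1) = (((i+1:Nat)):Int) := by omega
        rw [this, hc1, PySem.List.pyGetD_natCast, PySem.List.pyGetD_natCast]
        rfl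
      · rw [if_neg (by omega), if_neg hlast]
  obtain ⟨hcw1, hcw2, hcw3, hcw4⟩ := pvColwrite (N := N) (mN := mN) c (by omega)
    (fun dp i =>
      PySem.List.pyGetD (PySem.List.pyGetD M ((i:Nat):Int) []) ((c:Nat):Int) 0 +
        max (if (0:Int) < ((i:Nat):Int) then
              PySem.List.pyGetD (PySem.List.pyGetD dp (((i:Nat):Int)-1) []) (((c:Nat):Int)+1) 0 else 0)
          (max (PySem.List.pyGetD (PySem.List.pyGetD dp ((i:Nat):Int) []) (((c:Nat):Int)+1) 0)
            (if ((i:Nat):Int) < n-1 then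
              PySem.List.pyGetD (PySem.List.pyGetD dp (((i:Nat):Int)+1) []) (((c:Nat):Int)+1) 0 else 0)))
    (by
      intro dpa dpb hsa hsb hagree i hi
      beta_reduce
      obtain ⟨ha1, ha2, ha3⟩ := hval_cell dpa i hi hsa
      obtain ⟨hb1, hb2, hb3⟩ := hval_cell dpb i hi hsb
      rw [ha1, ha2, ha3, hb1, hb2, hb3]
      have e1 : (if i = 0 then 0 else pvCell dpa (i-1) (c+1)) = (if i = 0 then 0 else pvCell dpb (i-1) (c+1)) := by
        by_cases h0 : i = 0
        · simp [h0]
        · rw [if_neg h0, if_neg h0]; exact hagree (i-1) (c+1) (by omega) (by omega) (by omega)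
      have e2 : pvCell dpa i (c+1) = pvCell dpb i (c+1) := hagree i (c+1) hi (by omega) (by omega)
      have e3 : (if i + 1 < N then pvCell dpa (i+1) (c+1) else 0) = (if i + 1 < N then pvCell dpb (i+1) (c+1) else 0) := by
        by_cases hlast : i + 1 < N
        · rw [if_pos hlast, if_pos hlast]; exact hagree (i+1) (c+1) (by omega) (by omega) (by omega)
        · rw [if_neg hlast, if_neg hlast]
      rw [e1, e2, e3])
    (List.range N) List.nodup_range (fun i hi => List.mem_range.mp hi) dp hdp
  have hfun : pvAstep n m M dp (c:Int) =
      (List.range N).foldl (fun dp (i : Nat) => pySet2 dp (i:Int) (c:Int)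
        (PySem.List.pyGetD (PySem.List.pyGetD M ((i:Nat):Int) []) ((c:Nat):Int) 0 +
          max (if (0:Int) < ((i:Nat):Int) then
                PySem.List.pyGetD (PySem.List.pyGetD dp (((i:Nat):Int)-1) []) (((c:Nat):Int)+1) 0 else 0)
            (max (PySem.List.pyGetD (PySem.List.pyGetD dp ((i:Nat):Int) []) (((c:Nat):Int)+1) 0)
              (if ((i:Nat):Int) < n-1 then
                PySem.List.pyGetD (PySem.List.pyGetD dp (((i:Nat):Int)+1) []) (((c:Nat):Int)+1) 0 else 0)))) dp := by
    rw [pvAstep, hN]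
  rw [hfun]
  refine ⟨hcw1, ?_⟩
  intro i hi
  rw [hcw3 i (List.mem_range.mpr hi)]
  obtain ⟨h1, h2, h3⟩ := hval_cell dp i hi hdp
  rw [h1, h2, h3]
  simp [PySem.List.pyGetD_natCast]

-- A's j-loop establishes pvG in column 0
lemma pvRunsA {n m : Int} {M : List (List Int)} {N mN : Nat}
    (hn : n = (N:Int)) (hN : 1 ≤ N) :
    ∀ (t : Nat), t < mN → ∀ dp, pvShape N mN dp →
      (∀ i, i < N → pvCell dp i t = pvG n M mN (mN - 1 - t) i) →
      pvShape N mN ((PySem.List.pyRange ((t:Int) - 1) (-1) (-1)).foldl (pvAstep n m M) dp) ∧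
      ∀ i, i < N →
        pvCell ((PySem.List.pyRange ((t:Int) - 1) (-1) (-1)).foldl (pvAstep n m M) dp) i 0 =
          pvG n M mN (mN - 1) i := by
  intro t
  induction t with
  | zero =>
    intro ht dp hdp hinv
    have hcast : ((0:Nat):Int) - 1 = -1 := by norm_num
    have hnil : PySem.List.pyRange (-1) (-1) (-1) = [] := by decide
    rw [hcast, hnil]
    refine ⟨hdp, ?_⟩
    intro i hi
    have := hinv i hi
    simpa using this
  | succ t ih =>
    intro ht dp hdp hinv
    have hcast : ((t+1:Nat):Int) - 1 = ((t:Nat):Int) := by push_cast; ring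
    rw [hcast, pvPyRangeDown_cons ((t:Nat):Int) (by positivity), List.foldl_cons]
    obtain ⟨hstepshape, hstepcell⟩ := pvAstep_spec (M := M) (m := m) hn t (by omega) dp hdp
    refine ih (by omega) _ hstepshape ?_
    intro i hi
    rw [hstepcell i hi]
    have hs : mN - 1 - t = (mN - 1 - (t+1)) + 1 := by omega
    rw [hs]
    show _ = pvG n M mN ((mN - 1 - (t+1)) + 1) i
    rw [pvG]
    have hcol : mN - 1 - ((mN - 1 - (t+1)) + 1) = t := by omega
    rw [hcol]
    have eA : (if i = 0 then (0:Int) else pvCell dp (i-1) (t+1)) =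
        (if i = 0 then (0:Int) else pvG n M mN (mN - 1 - (t+1)) (i-1)) := by
      by_cases h0 : i = 0
      · rw [if_pos h0, if_pos h0]
      · rw [if_neg h0, if_neg h0, hinv (i-1) (by omega)]
    have eB : pvCell dp i (t+1) = pvG n M mN (mN - 1 - (t+1)) i := hinv i hi
    have eC : (if i + 1 < N then pvCell dp (i+1) (t+1) else (0:Int)) =
        (if (i:Int) < n - 1 then pvG n M mN (mN - 1 - (t+1)) (i+1) else (0:Int)) := by
      by_cases hlast : i + 1 < N
      · rw [if_pos hlast, if_pos (by omega), hinv (i+1) (by omega)]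
      · rw [if_neg hlast, if_neg (by omega)]
    rw [eA, eB, eC, PySem.List.pyGetD_natCast]

-- B-side: what a valid memo cache holds
def pvCacheOK (n : Int) (M : List (List Int)) (N mN : Nat) (cache : PySem.Dict (Int × Int) Int) : Prop :=
  ∀ p v, cache.get? p = some v →
    ∃ i j : Nat, p = ((i:Int), (j:Int)) ∧ i < N ∧ j < mN ∧ v = pvG n M mN (mN - 1 - j) i

lemma pvCacheOK_insert {n : Int} {M : List (List Int)} {N mN : Nat}
    {cache : PySem.Dict (Int × Int) Int} (h : pvCacheOK n M N mN cache)
    {i j : Nat} (hi : i < N) (hj : j < mN) :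
    pvCacheOK n M N mN (cache.insert ((i:Int), (j:Int)) (pvG n M mN (mN - 1 - j) i)) := by
  intro p v hv
  rw [PySem.Dict.get?_insert] at hv
  by_cases hp : p = ((i:Int), (j:Int))
  · rw [if_pos hp] at hv
    exact ⟨i, j, hp, hi, hj, (Option.some_injective _ hv).symm⟩
  · rw [if_neg hp] at hv
    exact h p v hv

lemma pvGold_ok {n m : Int} {M : List (List Int)} {N mN : Nat}
    (hn : n = (N:Int)) (hm : m = (mN:Int)) :
    ∀ (fuel : Nat) (i j : Nat) (cache : PySem.Dict (Int × Int) Int),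
      i < N → j < mN → mN - 1 - j ≤ fuel → pvCacheOK n M N mN cache →
      (pvGold n m M fuel (i:Int) (j:Int) cache).1 = pvG n M mN (mN - 1 - j) i ∧
      pvCacheOK n M N mN (pvGold n m M fuel (i:Int) (j:Int) cache).2 := by
  intro fuel
  induction fuel with
  | zero =>
    intro i j cache hi hj hfuel hok
    have hj' : j = mN - 1 := by omega
    rw [pvGold]
    cases hget : cache.get? ((i:Int), (j:Int)) with
    | some v =>
      obtain ⟨i', j', hp, hi', hj'', hv⟩ := hok _ _ hget
      have : i' = i ∧ j' = j := by
        obtain ⟨h1, h2⟩ := Prod.mk.injEq .. ▸ hp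
        exact ⟨by exact_mod_cast h1.symm, by exact_mod_cast h2.symm⟩
      simp only [hget]
      exact ⟨by rw [hv, this.1, this.2], hok⟩
    | none =>
      simp only [hget]
      rw [if_pos (by omega)]
      have hbase : PySem.List.pyGetD (PySem.List.pyGetD M (i:Int) []) (j:Int) 0 =
          pvG n M mN (mN - 1 - j) i := by
        rw [PySem.List.pyGetD_natCast, PySem.List.pyGetD_natCast]
        have : mN - 1 - j = 0 := by omega
        rw [this, pvG, hj']
      refine ⟨hbase, ?_⟩
      rw [hbase]
      exact pvCacheOK_insert hok hi hj
  | succ fuel ih =>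
    intro i j cache hi hj hfuel hok
    rw [pvGold]
    cases hget : cache.get? ((i:Int), (j:Int)) with
    | some v =>
      obtain ⟨i', j', hp, hi', hj'', hv⟩ := hok _ _ hget
      have : i' = i ∧ j' = j := by
        obtain ⟨h1, h2⟩ := Prod.mk.injEq .. ▸ hp
        exact ⟨by exact_mod_cast h1.symm, by exact_mod_cast h2.symm⟩
      simp only [hget]
      exact ⟨by rw [hv, this.1, this.2], hok⟩
    | none =>
      simp only [hget]
      by_cases hlast : (j:Int) = m - 1
      · rw [if_pos hlast]
        have hj' : j = mN - 1 := by omega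
        have hbase : PySem.List.pyGetD (PySem.List.pyGetD M (i:Int) []) (j:Int) 0 =
            pvG n M mN (mN - 1 - j) i := by
          rw [PySem.List.pyGetD_natCast, PySem.List.pyGetD_natCast]
          have : mN - 1 - j = 0 := by omega
          rw [this, pvG, hj']
        refine ⟨hbase, ?_⟩
        rw [hbase]
        exact pvCacheOK_insert hok hi hj
      · rw [if_neg hlast]
        have hjlt : j + 1 < mN := by omega
        have hfuel' : mN - 1 - (j+1) ≤ fuel := by omega
        have hj1 : (j:Int) + 1 = ((j+1:Nat):Int) := by push_cast; ring
        -- up-right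
        have hur : ∀ cache, pvCacheOK n M N mN cache →
            ((if 0 < (i:Int) then pvGold n m M fuel ((i:Int)-1) ((j:Int)+1) cache else (0, cache)).1 =
              (if i = 0 then 0 else pvG n M mN (mN - 1 - (j+1)) (i-1)) ∧
             pvCacheOK n M N mN
              (if 0 < (i:Int) then pvGold n m M fuel ((i:Int)-1) ((j:Int)+1) cache else (0, cache)).2) := by
          intro cache hok
          by_cases h0 : i = 0
          · rw [if_neg (by omega), if_pos h0]; exact ⟨rfl, hok⟩
          · rw [if_pos (by omega), if_neg h0]
            have hi1 : (i:Int) - 1 = ((i-1:Nat):Int) := by omega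
            rw [hi1, hj1]
            exact ih (i-1) (j+1) cache (by omega) hjlt hfuel' hok
        have hdr : ∀ cache, pvCacheOK n M N mN cache →
            ((if (i:Int) < n - 1 then pvGold n m M fuel ((i:Int)+1) ((j:Int)+1) cache else (0, cache)).1 =
              (if (i:Int) < n - 1 then pvG n M mN (mN - 1 - (j+1)) (i+1) else 0) ∧
             pvCacheOK n M N mN
              (if (i:Int) < n - 1 then pvGold n m M fuel ((i:Int)+1) ((j:Int)+1) cache else (0, cache)).2) := by
          intro cache hok
          by_cases hl : (i:Int) < n - 1
          · rw [if_pos hl, if_pos hl]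
            have hi1 : (i:Int) + 1 = ((i+1:Nat):Int) := by push_cast; ring
            rw [hi1, hj1]
            exact ih (i+1) (j+1) cache (by omega) hjlt hfuel' hok
          · rw [if_neg hl, if_neg hl]; exact ⟨rfl, hok⟩
        obtain ⟨hur1, hur2⟩ := hur cache hok
        have hr := ih i (j+1)
          (if 0 < (i:Int) then pvGold n m M fuel ((i:Int)-1) ((j:Int)+1) cache else (0, cache)).2
          hi hjlt hfuel' hur2
        rw [← hj1] at hr
        obtain ⟨hr1, hr2⟩ := hr
        obtain ⟨hdr1, hdr2⟩ := hdr _ hr2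
        have hs : mN - 1 - j = (mN - 1 - (j+1)) + 1 := by omega
        have hval : PySem.List.pyGetD (PySem.List.pyGetD M (i:Int) []) (j:Int) 0 +
            max (if 0 < (i:Int) then pvGold n m M fuel ((i:Int)-1) ((j:Int)+1) cache else (0, cache)).1
              (max (pvGold n m M fuel (i:Int) ((j:Int)+1)
                  (if 0 < (i:Int) then pvGold n m M fuel ((i:Int)-1) ((j:Int)+1) cache else (0, cache)).2).1
                (if (i:Int) < n - 1 then pvGold n m M fuel ((i:Int)+1) ((j:Int)+1)
                    (pvGold n m M fuel (i:Int) ((j:Int)+1)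
                      (if 0 < (i:Int) then pvGold n m M fuel ((i:Int)-1) ((j:Int)+1) cache else (0, cache)).2).2
                  else (0, (pvGold n m M fuel (i:Int) ((j:Int)+1)
                      (if 0 < (i:Int) then pvGold n m M fuel ((i:Int)-1) ((j:Int)+1) cache else (0, cache)).2).2)).1) =
            pvG n M mN (mN - 1 - j) i := by
          rw [hur1, hr1, hdr1, hs, pvG]
          have hcol : mN - 1 - ((mN - 1 - (j+1)) + 1) = j := by omega
          rw [hcol, PySem.List.pyGetD_natCast, PySem.List.pyGetD_natCast]
        exact ⟨hval, by rw [hval]; exact pvCacheOK_insert hdr2 hi hj⟩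

-- B's generator loop produces exactly the pvG values of column 0
lemma pvBfold {n m : Int} {M : List (List Int)} {N mN : Nat}
    (hn : n = (N:Int)) (hm : m = (mN:Int)) (hmN : 1 ≤ mN) :
    ∀ (ks : List Nat), (∀ k ∈ ks, k < N) →
      ∀ (acc : List Int) (cache : PySem.Dict (Int × Int) Int), pvCacheOK n M N mN cache →
      (ks.foldl (fun acc (i : Nat) =>
          let r := pvGold n m M (m-1).toNat (i:Int) 0 acc.2
          (acc.1 ++ [r.1], r.2)) (acc, cache)).1 =
        acc ++ ks.map (fun i => pvG n M mN (mN - 1) i) := by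
  intro ks
  induction ks with
  | nil => intro _ acc cache _; simp
  | cons k rest ih =>
    intro hmem acc cache hok
    have hk : k < N := hmem k List.mem_cons_self
    have h0 : ((0:Nat):Int) = (0:Int) := rfl
    have hfuel : mN - 1 - 0 ≤ (m-1).toNat := by omega
    have := pvGold_ok (M := M) hn hm (m-1).toNat k 0 cache hk (by omega) hfuel hok
    rw [h0] at this
    obtain ⟨h1, h2⟩ := this
    rw [List.foldl_cons]
    have hstep := ih (fun i hi => hmem i (List.mem_cons_of_mem _ hi))
      (acc ++ [(pvGold n m M (m-1).toNat (k:Int) 0 cache).1])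
      (pvGold n m M (m-1).toNat (k:Int) 0 cache).2 h2
    simp only [] at hstep ⊢
    rw [hstep, h1]
    have : mN - 1 - 0 = mN - 1 := by omega
    rw [this]
    simp

-- ===== VERDICT (by name: the statement is the Claim_ definition above) =====
theorem maxGold_spec : Claim_equal_maxGold := by
  intro n m M _ hpre
  obtain ⟨hn1, hm1, hMl, hrowlen⟩ := hpre
  unfold Spec_maxGold
  show maxGold n m M = maxGold_alt n m M
  simp only [maxGold, maxGold_alt]
  set N := n.toNat with hNdef
  set mN := m.toNat with hmNdef
  have hn : n = (N:Int) := by omega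
  have hm : m = (mN:Int) := by omega
  have hN : 1 ≤ N := by omega
  have hmN : 1 ≤ mN := by omega
  have hm1' : (m - 1 : Int) = ((mN - 1 : Nat) : Int) := by omega
  have hm2' : (m - 2 : Int) = (((mN - 1 : Nat) : Int) - 1 : Int) := by omega
  simp only [hm1', hm2']
  have hdp0 : pvShape N mN ((List.range N).map (fun _ => List.replicate mN (0:Int))) := by
    refine ⟨by simp, ?_⟩
    intro i hi
    rw [List.getD_eq_getElem _ _ (by simp; omega), List.getElem_map]
    simp
  obtain ⟨hs1, -, hc3, -⟩ := pvColwrite (N := N) (mN := mN) (mN - 1) (by omega)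
    (fun _ i => PySem.List.pyGetD (PySem.List.pyGetD M ((i:Nat):Int) []) (((mN-1:Nat)):Int) 0)
    (fun _ _ _ _ _ _ _ => rfl)
    (List.range N) List.nodup_range (fun i hi => List.mem_range.mp hi) _ hdp0
  have hinv0 : ∀ i, i < N →
      pvCell ((List.range N).foldl (fun dp (i : Nat) => pySet2 dp (i:Int) (((mN-1:Nat)):Int)
        (PySem.List.pyGetD (PySem.List.pyGetD M ((i:Nat):Int) []) (((mN-1:Nat)):Int) 0))
        ((List.range N).map (fun _ => List.replicate mN (0:Int)))) i (mN - 1) =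
      pvG n M mN (mN - 1 - (mN - 1)) i := by
    intro i hi
    rw [hc3 i (List.mem_range.mpr hi)]
    have : mN - 1 - (mN - 1) = 0 := by omega
    rw [this, pvG, PySem.List.pyGetD_natCast, PySem.List.pyGetD_natCast]
  obtain ⟨-, hr3⟩ := pvRunsA (M := M) (m := m) (mN := mN) hn hN (mN - 1) (by omega) _ hs1 hinv0
  have hAlist : (List.range N).map
      (fun (i : Nat) => PySem.List.pyGetD (PySem.List.pyGetD
        ((PySem.List.pyRange (((mN-1:Nat):Int) - 1) (-1) (-1)).foldl (pvAstep n m M)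
          ((List.range N).foldl (fun dp (i : Nat) => pySet2 dp (i:Int) (((mN-1:Nat)):Int)
            (PySem.List.pyGetD (PySem.List.pyGetD M ((i:Nat):Int) []) (((mN-1:Nat)):Int) 0))
            ((List.range N).map (fun _ => List.replicate mN (0:Int))))) (i:Int) []) 0 0) =
      (List.range N).map (fun i => pvG n M mN (mN - 1) i) := by
    apply List.map_congr_left
    intro i hi
    have hiN : i < N := List.mem_range.mp hi
    rw [← hr3 i hiN]
    unfold pvCell
    rw [PySem.List.pyGetD_natCast]
    have h0 : (0:Int) = ((0:Nat):Int) := rfl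
    rw [h0, PySem.List.pyGetD_natCast]
  rw [hAlist]
  have hBlist := pvBfold (M := M) hn hm hmN (List.range N)
    (fun i hi => List.mem_range.mp hi) [] PySem.Dict.empty
    (by intro p v hv; rw [PySem.Dict.get?_empty] at hv; exact absurd hv (by simp))
  rw [hm1'] at hBlist
  simp only [List.nil_append] at hBlist
  rw [hBlist]
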